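-- pv_equiv track=rewrite | github.com/jhamburg/capstone | model/tagger_model/lexicon.py | make_lexicon
-- ===== SOURCE A (Python) =====
-- def make_lexicon(token_seqs, min_freq=1, unknown = u'<UNK>'):
--     """Create lexicon from input based on a frequency
--
--         Parameters:
--
--         token_seqs
--         ----------
--            A list of a list of input tokens that will be used to create the lexicon
--
--         min_freq
--         --------
--            Number of times the token needs to be in the corpus to be included in the
--            lexicon.  Otherwise, will be replaced with the "unknown" entry
--
--         unknown
--         -------
--            The word in the lexicon that should be used for tokens not existing in lexicon.
--            This can be a value that already exists in input list.  For instance, in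
--            Named Entity Recognition, a value of "other" or "O" may already be a tag
--            and so having "other" and "unknown" are the same thing!
--     """
--     # Count how often each word appears in the text.
--     token_counts = {}
--     for seq in token_seqs:
--         for token in seq:
--             if token in token_counts:
--                 token_counts[token] += 1
--             else:
--                 token_counts[token] = 1
--
--     # Then, assign each word to a numerical index.
--     # Filter words that occur less than min_freq times.
--     lexicon = [token for token, count in token_counts.items() if count >= min_freq]
--
--     # Have to delete unknown value from token list so not a gap in lexicon values when
--     # turning it into a lexicon (aka, if unknown == OTHER and that is the 7th value,
--     # then 7 won't exist in the lexicon which may cause issues)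
--     if unknown in lexicon:
--         lexicon.remove(unknown)
--
--     # Indices start at 1. 0 is reserved for padding, and 1 is reserved for unknown words.
--     lexicon = {token:idx + 2 for idx,token in enumerate(lexicon)}
--
--     lexicon[unknown] = 1 # Unknown words are those that occur fewer than min_freq times
--     lexicon_size = len(lexicon)
--     return lexicon
-- ===== SOURCE B (Python) =====
-- def make_lexicon(token_seqs, min_freq=1, unknown = u'<UNK>'):
--     # First pass: count token frequencies.
--     counts = {}
--     for seq in token_seqs:
--         for token in seq:
--             counts[token] = counts.get(token, 0) + 1
--     # Second pass: assign indices directly in first-appearance order,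
--     # using the output dict itself as the "seen" set.
--     lexicon = {}
--     idx = 2
--     for seq in token_seqs:
--         for token in seq:
--             if token not in lexicon and token != unknown and counts[token] >= min_freq:
--                 lexicon[token] = idx
--                 idx += 1
--     lexicon[unknown] = 1
--     return lexicon
-- ===== Notes on version B (the rewrite author's own statement) =====
-- stated objective: simpler
-- what changed: B drops A's intermediate filtered list, the remove(unknown) pass and enumerate(): after counting, a second pass over the raw token sequences assigns indices directly in first-appearance order, using the output dict itself as the seen-set.
import Mathlib
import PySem

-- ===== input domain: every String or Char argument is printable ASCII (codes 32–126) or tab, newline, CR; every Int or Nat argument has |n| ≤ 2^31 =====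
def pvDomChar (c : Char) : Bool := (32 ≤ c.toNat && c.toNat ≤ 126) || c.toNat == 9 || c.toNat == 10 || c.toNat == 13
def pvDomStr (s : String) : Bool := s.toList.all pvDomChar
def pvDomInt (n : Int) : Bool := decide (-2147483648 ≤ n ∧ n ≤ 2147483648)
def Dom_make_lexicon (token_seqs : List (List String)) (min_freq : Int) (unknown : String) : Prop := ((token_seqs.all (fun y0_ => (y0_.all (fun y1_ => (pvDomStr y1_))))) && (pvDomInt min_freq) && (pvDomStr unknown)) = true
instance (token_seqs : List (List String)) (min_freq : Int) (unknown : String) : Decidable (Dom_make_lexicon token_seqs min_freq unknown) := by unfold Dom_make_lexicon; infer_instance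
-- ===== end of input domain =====

-- B replaces A's filtered-list / remove / enumerate middle stage by a second pass over the raw
-- sequences that assigns indices directly in first-appearance order (objective: simpler decomposition).


-- ===== PORT A =====
def make_lexicon (token_seqs : List (List String)) (min_freq : Int) (unknown : String) : List (String × Int) :=
  -- token_counts = {}; for seq … for token …: if token in token_counts: +=1 else: =1
  let token_counts : PySem.Dict String Int :=
    token_seqs.foldl (fun counts seq =>
      seq.foldl (fun counts token =>
        if counts.contains token then counts.insert token (counts.getD token 0 + 1)
        else counts.insert token 1) counts) PySem.Dict.empty
  -- [token for token, count in token_counts.items() if count >= min_freq]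
  let lexicon0 : List String :=
    (token_counts.items.filter (fun p => min_freq ≤ p.2)).map (·.1)
  -- if unknown in lexicon: lexicon.remove(unknown)
  let lexicon1 : List String :=
    if unknown ∈ lexicon0 then (PySem.List.remove? lexicon0 unknown).getD lexicon0 else lexicon0
  -- {token: idx + 2 for idx, token in enumerate(lexicon)}
  let lexicon : PySem.Dict String Int :=
    (PySem.List.enumerate lexicon1 0).foldl (fun d p => d.insert p.2 (p.1 + 2)) PySem.Dict.empty
  -- lexicon[unknown] = 1
  (lexicon.insert unknown 1).items

-- ===== PORT B =====
def make_lexicon_alt (token_seqs : List (List String)) (min_freq : Int) (unknown : String) : List (String × Int) :=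
  -- counts[token] = counts.get(token, 0) + 1
  let counts : PySem.Dict String Int :=
    token_seqs.foldl (fun c seq =>
      seq.foldl (fun c t => c.insert t (c.getD t 0 + 1)) c) PySem.Dict.empty
  -- lexicon = {}; idx = 2; second pass assigning indices in first-appearance order
  let st : PySem.Dict String Int × Int :=
    token_seqs.foldl (fun st seq =>
      seq.foldl (fun st t =>
        if !st.1.contains t && t != unknown && decide (min_freq ≤ counts.getD t 0) then
          (st.1.insert t st.2, st.2 + 1)
        else st) st) ((PySem.Dict.empty : PySem.Dict String Int), (2 : Int))
  -- lexicon[unknown] = 1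
  (st.1.insert unknown 1).items

-- ===== PRECONDITION & SPEC =====
def Spec_make_lexicon (token_seqs : List (List String)) (min_freq : Int) (unknown : String) (out : List (String × Int)) : Prop := out = make_lexicon_alt token_seqs min_freq unknown
instance (token_seqs : List (List String)) (min_freq : Int) (unknown : String) (out : List (String × Int)) : Decidable (Spec_make_lexicon token_seqs min_freq unknown out) := by unfold Spec_make_lexicon; infer_instance

-- ===== CLAIM (what is proved, stated in full; the proofs are below) =====
def Claim_equal_make_lexicon : Prop := ∀ (token_seqs : List (List String)) (min_freq : Int) (unknown : String), Dom_make_lexicon token_seqs min_freq unknown → Spec_make_lexicon token_seqs min_freq unknown (make_lexicon token_seqs min_freq unknown)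

-- ===== LEMMAS AND PROOFS =====

-- pair each element with indices i, i+1, … (the shape both ports' index assignment reduces to)
def enum2 : List String → Int → List (String × Int)
  | [], _ => []
  | x :: r, i => (x, i) :: enum2 r (i + 1)

-- the elements of l not yet in seen, in first-appearance order (new part of PySem.Set.update)
def news : List String → List String → List String
  | [], _ => []
  | t :: l, seen => if t ∈ seen then news l seen else t :: news l (seen ++ [t])

-- B's second pass, abstracted: tokens kept by cond, first occurrence only
def ffpass (cond : String → Bool) : List String → List String → List String
  | [], _ => []
  | t :: l, seen => if t ∈ seen ∨ cond t = false then ffpass cond l seen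
                    else t :: ffpass cond l (seen ++ [t])

lemma news_update (l seen : List String) :
    PySem.Set.update seen l = seen ++ news l seen := by
  induction l generalizing seen with
  | nil => simp [news, PySem.Set.update]
  | cons t l ih =>
    have hstep : PySem.Set.update seen (t :: l) = PySem.Set.update (PySem.Set.add seen t) l := by
      simp [PySem.Set.update]
    by_cases h : t ∈ seen
    · have : PySem.Set.add seen t = seen := by
        simp [PySem.Set.add, PySem.Set.contains, h]
      rw [hstep, this, ih, news, if_pos h]
    · have : PySem.Set.add seen t = seen ++ [t] := by
        simp [PySem.Set.add, PySem.Set.contains, h]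
      rw [hstep, this, ih, news, if_neg h]
      simp

lemma ffpass_eq_filter (cond : String → Bool) (l : List String) :
    ∀ seen1 seen2 : List String, (∀ t, cond t = true → (t ∈ seen1 ↔ t ∈ seen2)) →
    ffpass cond l seen1 = (news l seen2).filter cond := by
  induction l with
  | nil => intro _ _ _; simp [ffpass, news]
  | cons t l ih =>
    intro seen1 seen2 hinv
    by_cases hc : cond t = true
    · by_cases h1 : t ∈ seen1
      · have h2 : t ∈ seen2 := (hinv t hc).mp h1
        rw [ffpass, if_pos (Or.inl h1), news, if_pos h2]
        exact ih _ _ hinv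
      · have h2 : t ∉ seen2 := fun h => h1 ((hinv t hc).mpr h)
        rw [ffpass, if_neg (by simp [h1, hc]), news, if_neg h2]
        rw [List.filter_cons_of_pos hc]
        congr 1
        refine ih _ _ ?_
        intro u hu
        constructor
        · intro h; rcases List.mem_append.mp h with h | h
          · exact List.mem_append.mpr (Or.inl ((hinv u hu).mp h))
          · exact List.mem_append.mpr (Or.inr h)
        · intro h; rcases List.mem_append.mp h with h | h
          · exact List.mem_append.mpr (Or.inl ((hinv u hu).mpr h))
          · exact List.mem_append.mpr (Or.inr h)
    · have hc' : cond t = false := by simpa using hc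
      rw [ffpass, if_pos (Or.inr hc')]
      by_cases h2 : t ∈ seen2
      · rw [news, if_pos h2]; exact ih _ _ hinv
      · rw [news, if_neg h2, List.filter_cons_of_neg (by simp [hc'])]
        refine ih _ _ ?_
        intro u hu
        have hut : u ≠ t := fun h => by rw [h] at hu; simp [hc'] at hu
        rw [hinv u hu]
        simp [List.mem_append, hut]

-- B's second pass over a flat token stream: items appended in ffpass order with indices from i
lemma pass_items (cond : String → Bool) (l : List String) :
    ∀ (d : PySem.Dict String Int) (i : Int),
    (l.foldl (fun st t => if !st.1.contains t && cond t then (st.1.insert t st.2, st.2 + 1) else st)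
      (d, i)).1.items = d.items ++ enum2 (ffpass cond l d.keys) i := by
  induction l with
  | nil => intro d i; simp [ffpass, enum2]
  | cons t l ih =>
    intro d i
    by_cases hc : d.contains t
    · have hm : t ∈ d.keys := (PySem.Dict.contains_iff_mem_keys d t).mp hc
      rw [List.foldl_cons]
      simp only [hc, Bool.not_true, Bool.false_and, Bool.false_eq_true, if_false]
      rw [ih d i, ffpass, if_pos (Or.inl hm)]
    · have hcf : d.contains t = false := by simpa using hc
      have hm : t ∉ d.keys := fun h => by
        rw [(PySem.Dict.contains_iff_mem_keys d t).mpr h] at hcf; simp at hcf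
      by_cases hp : cond t = true
      · rw [List.foldl_cons]
        simp only [hcf, Bool.not_false, Bool.true_and, hp, reduceIte]
        rw [ih (d.insert t i) (i + 1),
          PySem.Dict.items_insert_of_not_contains _ _ hcf,
          PySem.Dict.keys_insert_of_not_contains _ _ hcf,
          ffpass, if_neg (by simp [hm, hp])]
        simp [enum2]
      · have hp' : cond t = false := by simpa using hp
        rw [List.foldl_cons]
        simp only [hp', Bool.and_false, Bool.false_eq_true, if_false]
        rw [ih d i, ffpass, if_pos (Or.inr hp')]

lemma mem_enum2_fst {x : String × Int} : ∀ (xs : List String) (i : Int), x ∈ enum2 xs i → x.1 ∈ xs := by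
  intro xs
  induction xs with
  | nil => intro i h; simp [enum2] at h
  | cons y ys ih =>
    intro i h
    rw [enum2, List.mem_cons] at h
    rcases h with h | h
    · simp [h]
    · exact List.mem_cons_of_mem _ (ih _ h)

lemma enumerate_map_enum2 (xs : List String) : ∀ n : Int,
    (PySem.List.enumerate xs n).map (fun p => (p.2, p.1 + 2)) = enum2 xs (n + 2) := by
  induction xs with
  | nil => intro n; simp [PySem.List.enumerate_nil, enum2]
  | cons x r ih =>
    intro n
    rw [PySem.List.enumerate_cons, List.map_cons, ih (n + 1), enum2]
    ring_nf

theorem make_lexicon_spec_aux (token_seqs : List (List String)) (min_freq : Int) (unknown : String) :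
    make_lexicon token_seqs min_freq unknown = make_lexicon_alt token_seqs min_freq unknown := by
  simp only [make_lexicon, make_lexicon_alt]
  set ts : List String := token_seqs.flatten with hts
  -- both counting loops are Counter(ts)
  have hcntA : token_seqs.foldl (fun counts seq =>
      seq.foldl (fun counts token =>
        if counts.contains token then counts.insert token (counts.getD token 0 + 1)
        else counts.insert token 1) counts) PySem.Dict.empty = PySem.Dict.counter ts := by
    rw [← List.foldl_flatten, ← hts, ← PySem.Dict.foldl_insert_getD_add_one_eq_counter]
    apply PySem.List.foldl_congr_mem
    intro c t _
    by_cases h : c.contains t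
    · simp [h]
    · have h' : c.contains t = false := by simpa using h
      simp [h', PySem.Dict.getD_of_not_contains (h := h')]
  have hcntB : token_seqs.foldl (fun c seq =>
      seq.foldl (fun c t => c.insert t (c.getD t 0 + 1)) c) PySem.Dict.empty
      = PySem.Dict.counter ts := by
    rw [← List.foldl_flatten, ← hts, PySem.Dict.foldl_insert_getD_add_one_eq_counter]
  rw [hcntA, hcntB]
  -- the condition both programs keep a token by
  set cond : String → Bool :=
    fun t => (t != unknown && decide (min_freq ≤ (PySem.Dict.counter ts).getD t 0)) with hcond
  -- A's intermediate list is (set of ts in first-appearance order).filter cond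
  set S : List String := PySem.Set.ofList ts with hS
  have hSnd : S.Nodup := PySem.Set.nodup_ofList ts
  have hitems : (PySem.Dict.counter ts).items
      = S.map (fun k => (k, (ts.count k : Int))) := PySem.Dict.items_counter ts
  have hlex0 : ((PySem.Dict.counter ts).items.filter (fun p => min_freq ≤ p.2)).map (·.1)
      = S.filter (fun k => decide (min_freq ≤ (ts.count k : Int))) := by
    rw [hitems, List.filter_map, List.map_map]
    simp [Function.comp_def]
  rw [hlex0]
  set L0 : List String := S.filter (fun k => decide (min_freq ≤ (ts.count k : Int))) with hL0
  have hL0nd : L0.Nodup := hSnd.filter _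
  have hremove : (if unknown ∈ L0 then (PySem.List.remove? L0 unknown).getD L0 else L0)
      = L0.filter (fun x => x != unknown) := by
    by_cases h : unknown ∈ L0
    · rw [if_pos h, PySem.List.remove?_eq_some_erase _ _ h, Option.getD_some]
      exact hL0nd.erase_eq_filter unknown
    · rw [if_neg h]
      conv_lhs => rw [← List.erase_of_not_mem h]
      exact hL0nd.erase_eq_filter unknown
  rw [hremove]
  set L : List String := L0.filter (fun x => x != unknown) with hL
  have hLeq : L = S.filter cond := by
    rw [hL, hL0, List.filter_filter]
    apply List.filter_congr
    intro k hk
    rw [hcond]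
    congr 1
    rw [PySem.Dict.getD_counter]
  have hLnd : L.Nodup := hL0nd.filter _
  have hLnu : unknown ∉ L := by
    intro h
    rw [hL] at h
    have := (List.mem_filter.mp h).2
    simp at this
  -- A's dict-comprehension loop appends fresh keys
  have hAitems : ((PySem.List.enumerate L 0).foldl (fun d p => d.insert p.2 (p.1 + 2))
      (PySem.Dict.empty : PySem.Dict String Int)).items
      = (PySem.List.enumerate L 0).map (fun p => (p.2, p.1 + 2)) := by
    rw [PySem.Dict.items_foldl_insert_fresh]
    · rfl
    · intro a _; exact PySem.Dict.contains_empty _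
    · rw [PySem.List.map_snd_enumerate]; exact hLnd
  -- B's second pass
  have hBitems : (token_seqs.foldl (fun st seq =>
      seq.foldl (fun st t =>
        if !st.1.contains t && t != unknown && decide (min_freq ≤ (PySem.Dict.counter ts).getD t 0) then
          (st.1.insert t st.2, st.2 + 1)
        else st) st) ((PySem.Dict.empty : PySem.Dict String Int), (2 : Int))).1.items
      = enum2 (ffpass cond ts []) 2 := by
    rw [← List.foldl_flatten, ← hts]
    have h := pass_items cond ts (PySem.Dict.empty) 2
    rw [hcond] at h
    simp only [← Bool.and_assoc] at h
    rw [h, hcond]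
    rfl
  -- ffpass over the whole stream = S.filter cond = L
  have hff : ffpass cond ts [] = L := by
    rw [ffpass_eq_filter cond ts [] [] (fun _ _ => Iff.rfl), hLeq]
    congr 1
    have := news_update ts []
    simp only [List.nil_append] at this
    rw [hS, ← this]
    rfl
  -- assemble: compare final items after the unknown insert
  apply congrArg
  have hAnu : (((PySem.List.enumerate L 0).foldl (fun d p => d.insert p.2 (p.1 + 2))
      (PySem.Dict.empty : PySem.Dict String Int))).contains unknown = false := by
    by_contra h
    have h' := (PySem.Dict.contains_iff_mem_keys _ _).mp (Bool.ne_false_iff.mp h)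
    rw [PySem.Dict.keys, hAitems, List.map_map] at h'
    simp only [Function.comp_def] at h'
    rw [PySem.List.map_snd_enumerate] at h'
    exact hLnu h'
  have hBnu : ((token_seqs.foldl (fun st seq =>
      seq.foldl (fun st t =>
        if !st.1.contains t && t != unknown && decide (min_freq ≤ (PySem.Dict.counter ts).getD t 0) then
          (st.1.insert t st.2, st.2 + 1)
        else st) st) ((PySem.Dict.empty : PySem.Dict String Int), (2 : Int))).1).contains unknown = false := by
    by_contra h
    have h' := (PySem.Dict.contains_iff_mem_keys _ _).mp (Bool.ne_false_iff.mp h)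
    rw [PySem.Dict.keys, hBitems, hff] at h'
    rcases List.mem_map.mp h' with ⟨p, hp, hpe⟩
    exact hLnu (hpe ▸ mem_enum2_fst _ _ hp)
  apply PySem.Dict.ext
  rw [PySem.Dict.items_insert_of_not_contains _ _ hAnu,
      PySem.Dict.items_insert_of_not_contains _ _ hBnu,
      hAitems, hBitems, hff]
  rw [enumerate_map_enum2 L 0]
  norm_num

-- ===== VERDICT (by name: the statement is the Claim_ definition above) =====
theorem make_lexicon_spec : Claim_equal_make_lexicon := by
  intro token_seqs min_freq unknown _
  exact make_lexicon_spec_aux token_seqs min_freq unknown
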